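-- pv_equiv track=rewrite | github.com/Harshil2107/resources-azure-api | shared/utils.py | get_latest_versions
-- ===== SOURCE A (Python) =====
-- def parse_version(version_str):
--     """Parse a version string into a tuple of integers for comparison."""
--     try:
--         return tuple(int(x) for x in version_str.split("."))
--     except (ValueError, AttributeError):
--         return (0,)
--
-- def get_latest_versions(resources):
--     """
--     Filter resources to return only the latest version of each resource.
--     Groups resources by 'id' and returns the one with the highest
--     'resource_version'.
--     """
--     latest_by_id = {}
--     for resource in resources:
--         resource_id = resource.get("id")
--         if not resource_id:
--             continue
--
--         current_version = parse_version(resource.get("resource_version", "0"))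
--
--         if resource_id not in latest_by_id:
--             latest_by_id[resource_id] = resource
--         else:
--             existing_version = parse_version(
--                 latest_by_id[resource_id].get("resource_version", "0")
--             )
--             if current_version > existing_version:
--                 latest_by_id[resource_id] = resource
--
--     return list(latest_by_id.values())
-- ===== SOURCE B (Python) =====
-- def parse_version(version_str):
--     """Parse a version string into a tuple of integers for comparison."""
--     try:
--         return tuple(int(x) for x in version_str.split("."))
--     except (ValueError, AttributeError):
--         return (0,)
--
-- def get_latest_versions(resources):
--     """
--     Two-pass group-then-reduce: first group resources by id (first-appearance
--     order, skipping falsy ids), then pick each group's winner with max, whose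
--     first-maximal rule matches the streaming strict-> tie-breaking.
--     """
--     groups = {}
--     for resource in resources:
--         resource_id = resource.get("id")
--         if not resource_id:
--             continue
--         groups[resource_id] = groups.get(resource_id, []) + [resource]
--     return [
--         max(group, key=lambda r: parse_version(r.get("resource_version", "0")))
--         for group in groups.values()
--     ]
-- ===== Notes on version B (the rewrite author's own statement) =====
-- stated objective: alternative
-- what changed: A's single streaming reduce (keep the current winner per id in a dict) is replaced by a two-pass group-then-reduce: first build an insertion-ordered dict id -> list of resources, then take max(group, key=parse_version) per group, relying on max's first-maximal rule to match A's strict-> tie-breaking.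
import Mathlib
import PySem

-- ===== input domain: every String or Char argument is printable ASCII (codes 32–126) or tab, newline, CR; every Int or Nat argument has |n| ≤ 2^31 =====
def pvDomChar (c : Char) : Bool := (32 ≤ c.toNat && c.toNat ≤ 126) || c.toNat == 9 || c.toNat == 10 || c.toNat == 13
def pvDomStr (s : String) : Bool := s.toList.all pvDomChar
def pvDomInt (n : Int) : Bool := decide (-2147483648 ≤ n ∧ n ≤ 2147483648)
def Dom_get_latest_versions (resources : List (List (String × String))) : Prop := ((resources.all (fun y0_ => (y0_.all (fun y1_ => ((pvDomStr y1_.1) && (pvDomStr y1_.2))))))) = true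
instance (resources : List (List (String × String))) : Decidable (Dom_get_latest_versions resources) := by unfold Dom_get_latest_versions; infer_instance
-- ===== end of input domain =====

-- B replaces A's streaming reduce by a two-pass group-by-id then max-per-group; same cost, different decomposition (objective: alternative).

-- shared helpers (both Pythons use the same parse_version and Python primitives)
-- resource.get(k) : first-match lookup in the dict
def rget (r : List (String × String)) (k : String) : Option String :=
  (PySem.Dict.mk r).get? k

-- resource.get(k, dflt)
def rgetD (r : List (String × String)) (k : String) (dflt : String) : String :=
  (rget r k).getD dflt

-- parse_version: tuple(int(x) for x in s.split(".")), (0,) on ValueError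
def parse_version (s : String) : List Int :=
  match ((PySem.Str.split? s ".").getD []).mapM PySem.Int.ofStr? with
  | some l => l
  | none => [0]

-- Python tuple '<' on int tuples (lexicographic, shorter prefix smaller); exact
def vlt : List Int → List Int → Bool
  | [], [] => false
  | [], _ :: _ => true
  | _ :: _, [] => false
  | a :: as, b :: bs => if a < b then true else if b < a then false else vlt as bs

-- the comparison key both Pythons use
def pvOf (r : List (String × String)) : List Int :=
  parse_version (rgetD r "resource_version" "0")

-- ===== PORT A =====
def get_latest_versions (resources : List (List (String × String))) : List (List (String × String)) :=
  (resources.foldl (fun d r =>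
    match rget r "id" with
    | none => d
    | some rid =>
      if rid = "" then d
      else
        match d.get? rid with
        | none => d.insert rid r
        | some existing =>
          if vlt (pvOf existing) (pvOf r) then d.insert rid r else d)
    (PySem.Dict.empty)).values

-- ===== PORT B =====
-- max(group, key=pvOf): first maximal element (strict '>' replaces)
def pyMaxBy (g : List (List (String × String))) : List (String × String) :=
  match g with
  | [] => []   -- unreachable: every group built below is nonempty
  | h :: t => t.foldl (fun w r => if vlt (pvOf w) (pvOf r) then r else w) h

def get_latest_versions_alt (resources : List (List (String × String))) : List (List (String × String)) :=
  ((resources.foldl (fun d r =>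
      match rget r "id" with
      | none => d
      | some rid =>
        if rid = "" then d
        else d.insert rid (d.getD rid [] ++ [r]))
    (PySem.Dict.empty)).values).map pyMaxBy

-- ===== PRECONDITION & SPEC =====
def Spec_get_latest_versions (resources : List (List (String × String))) (out : List (List (String × String))) : Prop := out = get_latest_versions_alt resources
instance (resources : List (List (String × String))) (out : List (List (String × String))) : Decidable (Spec_get_latest_versions resources out) := by unfold Spec_get_latest_versions; infer_instance

-- ===== CLAIM (what is proved, stated in full; the proofs are below) =====
def Claim_equal_get_latest_versions : Prop := ∀ (resources : List (List (String × String))), Dom_get_latest_versions resources → Spec_get_latest_versions resources (get_latest_versions resources)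

-- ===== LEMMAS AND PROOFS =====

-- the item-level correspondence: A's entry for a key is the max of B's group
def pvF (p : String × List (List (String × String))) : String × List (String × String) :=
  (p.1, pyMaxBy p.2)

-- A's loop body / B's loop body, named for the induction
def stepA (d : PySem.Dict String (List (String × String))) (r : List (String × String)) :
    PySem.Dict String (List (String × String)) :=
  match rget r "id" with
  | none => d
  | some rid =>
    if rid = "" then d
    else
      match d.get? rid with
      | none => d.insert rid r
      | some existing =>
        if vlt (pvOf existing) (pvOf r) then d.insert rid r else d

def stepB (d : PySem.Dict String (List (List (String × String)))) (r : List (String × String)) :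
    PySem.Dict String (List (List (String × String))) :=
  match rget r "id" with
  | none => d
  | some rid =>
    if rid = "" then d
    else d.insert rid (d.getD rid [] ++ [r])

theorem pyMaxBy_append (g : List (List (String × String))) (r : List (String × String)) (h : g ≠ []) :
    pyMaxBy (g ++ [r]) = (if vlt (pvOf (pyMaxBy g)) (pvOf r) then r else pyMaxBy g) := by
  cases g with
  | nil => exact absurd rfl h
  | cons hd t => simp [pyMaxBy, List.foldl_append]

theorem keys_eq_of_items_map (dA : PySem.Dict String (List (String × String)))
    (dB : PySem.Dict String (List (List (String × String))))
    (h : dA.items = dB.items.map pvF) : dA.keys = dB.keys := by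
  simp only [PySem.Dict.keys, h, List.map_map]
  rfl

theorem main_inv (l : List (List (String × String)))
    (dA : PySem.Dict String (List (String × String)))
    (dB : PySem.Dict String (List (List (String × String))))
    (hitems : dA.items = dB.items.map pvF)
    (hnodup : dB.keys.Nodup)
    (hne : ∀ p ∈ dB.items, p.2 ≠ []) :
    (l.foldl stepA dA).items = (l.foldl stepB dB).items.map pvF := by
  induction l generalizing dA dB with
  | nil => simpa using hitems
  | cons r t ih =>
    simp only [List.foldl_cons]
    have hkeys : dA.keys = dB.keys := keys_eq_of_items_map dA dB hitems
    have hAnodup : dA.keys.Nodup := hkeys ▸ hnodup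
    -- analyse one step
    rcases hid : rget r "id" with _ | rid
    · have e1 : stepA dA r = dA := by simp [stepA, hid]
      have e2 : stepB dB r = dB := by simp [stepB, hid]
      rw [e1, e2]; exact ih dA dB hitems hnodup hne
    · by_cases hrid : rid = ""
      · have e1 : stepA dA r = dA := by simp [stepA, hid, hrid]
        have e2 : stepB dB r = dB := by simp [stepB, hid, hrid]
        rw [e1, e2]; exact ih dA dB hitems hnodup hne
      · by_cases hc : dB.contains rid = true
        · -- rid already grouped
          rcases PySem.Dict.contains_eq_isSome_get? dB rid ▸ hc |> Option.isSome_iff_exists.mp with ⟨g, hg⟩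
          have hgmem : (rid, g) ∈ dB.items := PySem.Dict.mem_items_of_get?_eq_some dB hg
          have hgne : g ≠ [] := hne _ hgmem
          have hAmem : (rid, pyMaxBy g) ∈ dA.items := by
            rw [hitems]; exact List.mem_map.mpr ⟨(rid, g), hgmem, rfl⟩
          have hA : dA.get? rid = some (pyMaxBy g) :=
            PySem.Dict.get?_of_mem_items dA hAmem hAnodup
          have e2 : stepB dB r = dB.insert rid (g ++ [r]) := by
            simp [stepB, hid, hrid, PySem.Dict.getD_of_get?_eq_some dB [] hg]
          have hBc : dB.contains rid = true := hc
          have hitemsB' : (dB.insert rid (g ++ [r])).items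
              = dB.items.map (fun p => if p.1 == rid then (rid, g ++ [r]) else p) :=
            PySem.Dict.items_insert_of_contains dB (g ++ [r]) hBc
          have huniq : ∀ p ∈ dB.items, p.1 = rid → p.2 = g := by
            intro p hp hp1
            have : dB.get? p.1 = some p.2 := PySem.Dict.get?_of_mem_items dB hp hnodup
            rw [hp1, hg] at this
            exact (Option.some_injective _ this).symm
          have hnodup' : (dB.insert rid (g ++ [r])).keys.Nodup :=
            PySem.Dict.nodup_keys_insert _ _ _ hnodup
          have hne' : ∀ p ∈ (dB.insert rid (g ++ [r])).items, p.2 ≠ [] := by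
            intro p hp
            rcases (PySem.Dict.mem_items_insert _ _ _ _).mp hp with h | ⟨h, _⟩
            · subst h; simp
            · exact hne _ h
          by_cases hv : vlt (pvOf (pyMaxBy g)) (pvOf r) = true
          · have e1 : stepA dA r = dA.insert rid r := by
              simp [stepA, hid, hrid, hA, hv]
            rw [e1, e2]
            apply ih _ _ _ hnodup' hne'
            have hAc : dA.contains rid = true := by
              rw [PySem.Dict.contains_eq_isSome_get?, hA]; rfl
            rw [PySem.Dict.items_insert_of_contains dA r hAc, hitemsB', hitems,
              List.map_map, List.map_map]
            apply List.map_congr_left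
            intro p hp
            by_cases h1 : p.1 = rid
            · simp [pvF, h1, pyMaxBy_append g r hgne, hv]
            · simp [pvF, h1]
          · have e1 : stepA dA r = dA := by
              simp [stepA, hid, hrid, hA, hv]
            rw [e1, e2]
            apply ih _ _ _ hnodup' hne'
            rw [hitemsB', hitems, List.map_map]
            apply List.map_congr_left
            intro p hp
            by_cases h1 : p.1 = rid
            · have hpg : p.2 = g := huniq p hp h1
              simp [pvF, h1, hpg, pyMaxBy_append g r hgne, hv]
            · simp [pvF, h1]
        · -- fresh id
          have hcA : dA.contains rid = false := by
            rw [PySem.Dict.contains_eq_decide_mem_keys, hkeys,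
              ← PySem.Dict.contains_eq_decide_mem_keys]
            exact eq_false_of_ne_true hc
          have hAnone : dA.get? rid = none := by
            rw [PySem.Dict.get?_eq_none_iff_contains]; exact hcA
          have e1 : stepA dA r = dA.insert rid r := by
            simp [stepA, hid, hrid, hAnone]
          have hcB : dB.contains rid = false := eq_false_of_ne_true hc
          have e2 : stepB dB r = dB.insert rid [r] := by
            simp [stepB, hid, hrid, PySem.Dict.getD_of_not_contains dB _ hcB]
          rw [e1, e2]
          apply ih
          · rw [PySem.Dict.items_insert_of_not_contains dA r hcA,
              PySem.Dict.items_insert_of_not_contains dB [r] hcB, hitems, List.map_append]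
            rfl
          · exact PySem.Dict.nodup_keys_insert _ _ _ hnodup
          · intro p hp
            rcases (PySem.Dict.mem_items_insert _ _ _ _).mp hp with h | ⟨h, _⟩
            · subst h; simp
            · exact hne _ h

-- ===== VERDICT (by name: the statement is the Claim_ definition above) =====
theorem get_latest_versions_spec : Claim_equal_get_latest_versions := by
  intro resources _
  unfold Spec_get_latest_versions get_latest_versions get_latest_versions_alt
  have h := main_inv resources PySem.Dict.empty PySem.Dict.empty rfl (by simp) (by intro p hp; simp [PySem.Dict.empty] at hp)
  simp only [PySem.Dict.values]
  rw [show (resources.foldl (fun d r =>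
      match rget r "id" with
      | none => d
      | some rid =>
        if rid = "" then d
        else
          match d.get? rid with
          | none => d.insert rid r
          | some existing =>
            if vlt (pvOf existing) (pvOf r) then d.insert rid r else d)
    (PySem.Dict.empty)) = resources.foldl stepA PySem.Dict.empty from rfl,
    show (resources.foldl (fun d r =>
      match rget r "id" with
      | none => d
      | some rid =>
        if rid = "" then d
        else d.insert rid (d.getD rid [] ++ [r]))
    (PySem.Dict.empty)) = resources.foldl stepB PySem.Dict.empty from rfl, h,
    List.map_map, List.map_map]
  rfl
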